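-- pv_equiv track=rewrite | github.com/Applica-760/sen-lab-legacy | tools/data_analysis/analyze_behavior_shift.py | check_min_label_duration
-- ===== SOURCE A (Python) =====
-- def check_min_label_duration(series_str, min_duration):
--     """
--     系列内の各ラベルの連続時系列長が最低min_duration以上かチェック
--
--     Args:
--         series_str: 状態系列の文字列
--         min_duration: 各ラベルの最低持続時間
--
--     Returns:
--         bool: 全てのラベルがmin_duration以上ならTrue
--     """
--     if not series_str:
--         return False
--
--     current_state = series_str[0]
--     current_duration = 1
--
--     for char in series_str[1:]:
--         if char == current_state:
--             current_duration += 1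
--         else:
--             # 遷移が発生 - 前の状態の持続時間をチェック
--             if current_duration < min_duration:
--                 return False
--             current_state = char
--             current_duration = 1
--
--     # 最後のラベルの持続時間もチェック
--     if current_duration < min_duration:
--         return False
--
--     return True
-- ===== SOURCE B (Python) =====
-- def check_min_label_duration(series_str, min_duration):
--     if not series_str:
--         return False
--     # Stage 1: list of cut positions = run boundaries (0, each change point, end).
--     cuts = [0]
--     cuts += [i + 1 for i, (a, b) in enumerate(zip(series_str, series_str[1:])) if a != b]
--     cuts.append(len(series_str))
--     # Stage 2: each run length is the gap between adjacent cut positions.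
--     return all(b - a >= min_duration for a, b in zip(cuts, cuts[1:]))
-- ===== Notes on version B (the rewrite author's own statement) =====
-- stated objective: alternative
-- what changed: Instead of A's single-pass state machine counting the current run with early returns, B first materialises the list of boundary indices (cut positions where adjacent characters differ, plus both ends) and then checks that every gap between consecutive cut positions is at least min_duration.
import Mathlib
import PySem

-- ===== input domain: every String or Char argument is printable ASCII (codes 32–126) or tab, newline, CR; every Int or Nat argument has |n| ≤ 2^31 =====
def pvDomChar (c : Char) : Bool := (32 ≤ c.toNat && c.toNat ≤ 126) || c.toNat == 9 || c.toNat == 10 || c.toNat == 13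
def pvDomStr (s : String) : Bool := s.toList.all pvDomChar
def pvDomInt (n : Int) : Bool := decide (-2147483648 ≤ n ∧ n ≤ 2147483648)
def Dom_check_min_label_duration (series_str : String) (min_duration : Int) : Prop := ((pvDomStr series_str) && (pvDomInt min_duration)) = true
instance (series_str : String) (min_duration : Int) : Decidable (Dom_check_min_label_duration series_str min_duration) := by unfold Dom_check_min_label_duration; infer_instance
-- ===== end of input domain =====

-- B replaces A's run-counting state machine by two staged passes: build the list of
-- boundary (cut) positions, then check every gap between adjacent cuts (alternative; same cost).

-- ===== PORT A =====
-- the for-loop over series_str[1:] with its early returns; the base case is the final tail check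
def pvLoopA (min_duration : Int) (current_state : Char) (current_duration : Int) : List Char → Bool
  | [] => !(current_duration < min_duration)
  | ch :: rest =>
    if ch == current_state then
      pvLoopA min_duration current_state (current_duration + 1) rest
    else
      if current_duration < min_duration then false
      else pvLoopA min_duration ch 1 rest

def check_min_label_duration (series_str : String) (min_duration : Int) : Bool :=
  match series_str.toList with
  | [] => false
  | c :: rest => pvLoopA min_duration c 1 rest

-- ===== PORT B =====
-- [i + 1 for i, (a, b) in enumerate(zip(series_str, series_str[1:])) if a != b]
def pvBoundaries (l : List Char) : List Int :=
  (PySem.List.enumerate (l.zip (PySem.List.slice l (some 1) none)) 0).filterMap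
    (fun p => if p.2.1 ≠ p.2.2 then some (p.1 + 1) else none)

-- all(b - a >= min_duration for a, b in zip(cuts, cuts[1:]))
def pvGapsAll (m : Int) (cuts : List Int) : Bool :=
  (cuts.zip (cuts.drop 1)).all fun p => decide (m ≤ p.2 - p.1)

def check_min_label_duration_alt (series_str : String) (min_duration : Int) : Bool :=
  if series_str.toList = [] then false
  else
    pvGapsAll min_duration
      ((0 : Int) :: pvBoundaries series_str.toList ++ [(series_str.toList.length : Int)])

-- ===== PRECONDITION & SPEC =====
def Spec_check_min_label_duration (series_str : String) (min_duration : Int) (out : Bool) : Prop := out = check_min_label_duration_alt series_str min_duration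
instance (series_str : String) (min_duration : Int) (out : Bool) : Decidable (Spec_check_min_label_duration series_str min_duration out) := by unfold Spec_check_min_label_duration; infer_instance

-- ===== CLAIM (what is proved, stated in full; the proofs are below) =====
def Claim_equal_check_min_label_duration : Prop := ∀ (series_str : String) (min_duration : Int), Dom_check_min_label_duration series_str min_duration → Spec_check_min_label_duration series_str min_duration (check_min_label_duration series_str min_duration)

-- ===== LEMMAS AND PROOFS =====

-- shifting enumerate's start by one shifts every emitted boundary index by one
theorem pv_filterMap_enumerate_shift (t : List (Char × Char)) (s : Int) :
    (PySem.List.enumerate t (s + 1)).filterMap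
        (fun p => if p.2.1 ≠ p.2.2 then some (p.1 + 1) else none)
      = ((PySem.List.enumerate t s).filterMap
          (fun p => if p.2.1 ≠ p.2.2 then some (p.1 + 1) else none)).map (· + 1) := by
  induction t generalizing s with
  | nil => simp [PySem.List.enumerate_nil]
  | cons a t ih =>
    rw [PySem.List.enumerate_cons, PySem.List.enumerate_cons]
    by_cases h : a.1 = a.2
    · simp only [List.filterMap_cons, h, ne_eq, not_true_eq_false, if_false, ih]
    · simp only [List.filterMap_cons, ne_eq, h, not_false_eq_true, if_true, ih, List.map_cons]

-- one step of the boundary list: a change point contributes a cut at position 1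
theorem pvBoundaries_cons₂ (x y : Char) (r : List Char) :
    pvBoundaries (x :: y :: r)
      = (if x = y then (pvBoundaries (y :: r)).map (· + 1)
         else (1 : Int) :: (pvBoundaries (y :: r)).map (· + 1)) := by
  unfold pvBoundaries
  rw [PySem.List.slice_from_one, PySem.List.slice_from_one]
  simp only [List.tail_cons, List.zip_cons_cons, PySem.List.enumerate_cons, List.filterMap_cons]
  rw [show (0 : Int) + 1 = 0 + 1 by ring, pv_filterMap_enumerate_shift]
  by_cases h : x = y
  · simp [h]
  · simp [h]

theorem pvBoundaries_singleton (c : Char) : pvBoundaries [c] = [] := by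
  simp [pvBoundaries, PySem.List.slice_from_one]

theorem pvGapsAll_singleton (m a : Int) : pvGapsAll m [a] = true := by simp [pvGapsAll]
theorem pvGapsAll_cons₂ (m a b : Int) (r : List Int) :
    pvGapsAll m (a :: b :: r) = (decide (m ≤ b - a) && pvGapsAll m (b :: r)) := by
  simp [pvGapsAll]

-- gaps are invariant under translating every cut
theorem pvGapsAll_map_add_one (m : Int) (cs : List Int) :
    pvGapsAll m (cs.map (· + 1)) = pvGapsAll m cs := by
  induction cs with
  | nil => simp [pvGapsAll]
  | cons a cs ih =>
    cases cs with
    | nil => simp [pvGapsAll]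
    | cons b r =>
      simp only [List.map_cons] at ih ⊢
      rw [pvGapsAll_cons₂, pvGapsAll_cons₂, ih]
      congr 1
      rw [decide_eq_decide]
      omega

-- the cons++singleton instance of the translation invariance used in the main induction
theorem pvGapsAll_shift (m a b : Int) (X : List Int) :
    pvGapsAll m ((a + 1) :: X.map (· + 1) ++ [b + 1]) = pvGapsAll m (a :: X ++ [b]) := by
  have h : (a + 1) :: X.map (· + 1) ++ [b + 1] = ((a :: X ++ [b]).map (· + 1)) := by
    simp
  rw [h, pvGapsAll_map_add_one]

-- A's loop against B's cut list: the first cut is shifted back by the duration already counted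
theorem pvLoopA_eq_gaps (m : Int) (xs : List Char) (c : Char) (d : Int) :
    pvLoopA m c d xs
      = pvGapsAll m ((1 - d) :: pvBoundaries (c :: xs) ++ [((xs.length : Int) + 1)]) := by
  induction xs generalizing c d with
  | nil =>
    rw [pvBoundaries_singleton]
    have h : ((1 : Int) - d) :: ([] : List Int) ++ [((([] : List Char).length : Int) + 1)]
        = (1 - d) :: (1 : Int) :: [] := by simp
    rw [h, pvGapsAll_cons₂, pvGapsAll_singleton, Bool.and_true]
    rw [show pvLoopA m c d [] = !(decide (d < m)) from rfl]
    by_cases hd : d < m <;> simp [hd] <;> omega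
  | cons y r ih =>
    rw [pvBoundaries_cons₂]
    by_cases h : c = y
    · subst h
      rw [pvLoopA, if_pos (by simp), if_pos rfl, ih c (d + 1)]
      have e1 : (1 : Int) - d = (1 - (d + 1)) + 1 := by ring
      have e2 : (((c :: r).length : Int) + 1) = ((r.length : Int) + 1) + 1 := by
        simp only [List.length_cons]; push_cast; ring
      rw [e1, e2, pvGapsAll_shift]
    · rw [pvLoopA, if_neg (by simp only [beq_iff_eq]; exact fun hc => h hc.symm), if_neg h]
      rw [List.cons_append, List.cons_append, pvGapsAll_cons₂]
      have h2 : (1 : Int) :: ((pvBoundaries (y :: r)).map (· + 1)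
            ++ [(((y :: r).length : Int) + 1)])
          = ((0 : Int) + 1) :: (pvBoundaries (y :: r)).map (· + 1)
            ++ [(((r.length : Int) + 1) + 1)] := by
        simp only [List.length_cons, List.cons_append]; push_cast; ring_nf
      have hy : pvLoopA m y 1 r
          = pvGapsAll m ((0 : Int) :: pvBoundaries (y :: r) ++ [((r.length : Int) + 1)]) := by
        rw [ih y 1]; norm_num
      rw [h2, pvGapsAll_shift, ← hy]
      by_cases hd : d < m
      · rw [if_pos hd]
        have hdec : decide (m ≤ 1 - (1 - d)) = false := by
          rw [decide_eq_false_iff_not]; omega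
        rw [hdec, Bool.false_and]
      · rw [if_neg hd]
        have hdec : decide (m ≤ 1 - (1 - d)) = true := by
          rw [decide_eq_true_eq]; omega
        rw [hdec, Bool.true_and]

-- ===== VERDICT (by name: the statement is the Claim_ definition above) =====
theorem check_min_label_duration_spec : Claim_equal_check_min_label_duration := by
  intro s m _
  unfold Spec_check_min_label_duration check_min_label_duration check_min_label_duration_alt
  cases h : s.toList with
  | nil => simp
  | cons c rest =>
    simp only [reduceCtorEq, if_false]
    rw [pvLoopA_eq_gaps]
    have e : ((1 : Int) - 1) :: pvBoundaries (c :: rest) ++ [((rest.length : Int) + 1)]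
        = (0 : Int) :: pvBoundaries (c :: rest) ++ [(((c :: rest).length : Int))] := by
      simp only [List.length_cons]
      push_cast
      norm_num
    rw [e]
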